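-- pv_equiv track=rewrite | github.com/MBahuddin/Pacto | Pacto.py | binary_search_history
-- ===== SOURCE A (Python) =====
-- def binary_search_history(history, target_total):
--     low = 0
--     high = len(history) - 1
--     while low <= high:
--         mid = (low + high) // 2
--         mid_total = history[mid]['total']
--         if mid_total == target_total:
--             return mid
--         elif mid_total < target_total:
--             low = mid + 1
--         else:
--             high = mid - 1
--     return -1
-- ===== SOURCE B (Python) =====
-- def binary_search_history(history, target_total):
--     totals = [entry['total'] for entry in history]
--
--     def search(seg, offset):
--         if not seg:
--             return -1
--         mid = (len(seg) - 1) // 2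
--         rest = seg[mid:]
--         pivot = rest[0]
--         if pivot == target_total:
--             return offset + mid
--         if pivot < target_total:
--             return search(seg[mid + 1:], offset + mid + 1)
--         return search(seg[:mid], offset)
--
--     return search(totals, 0)
-- ===== Notes on version B (the rewrite author's own statement) =====
-- stated objective: alternative
-- what changed: B first extracts the plain list of totals in one pass, then runs a self-recursive search over shrinking slices of that integer list with an index offset, instead of A's while-loop over mutable low/high bounds indexing the dict list directly.
-- outside the precondition, e.g. on binary_search_history([{'total': 1}, {'a': 2}], 0): A returns -1, B raises KeyError
import Mathlib
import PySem

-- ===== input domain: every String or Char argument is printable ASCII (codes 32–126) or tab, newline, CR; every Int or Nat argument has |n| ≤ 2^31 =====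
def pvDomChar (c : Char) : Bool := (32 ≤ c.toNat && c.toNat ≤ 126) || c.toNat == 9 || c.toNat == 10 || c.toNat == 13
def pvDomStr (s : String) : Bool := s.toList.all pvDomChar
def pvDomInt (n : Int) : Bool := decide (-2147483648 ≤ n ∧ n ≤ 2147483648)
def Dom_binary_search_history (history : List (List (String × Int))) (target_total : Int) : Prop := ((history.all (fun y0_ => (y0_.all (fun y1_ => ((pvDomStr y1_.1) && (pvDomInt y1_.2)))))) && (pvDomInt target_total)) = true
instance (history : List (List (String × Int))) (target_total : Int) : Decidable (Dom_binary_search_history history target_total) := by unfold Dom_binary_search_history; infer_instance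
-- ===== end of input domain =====

-- B extracts the totals into a plain Int list in one pass, then searches it by a self-recursive
-- slice-with-offset helper instead of A's while-loop over mutable low/high bounds (objective: alternative).


-- ===== PORT A =====
-- while-loop over (low, high) → structural recursion on a fuel counter (fuel = len+1 always
-- suffices: the interval shrinks every iteration; the 0-fuel branch is unreachable); dict access
-- history[mid]['total'] → pyGet? + Dict.get? (the .getD defaults are unreached under Pre_)
def bsA_go (history : List (List (String × Int))) (target_total low high : Int) : Nat → Int
  | 0 => -1
  | fuel + 1 =>
    if low ≤ high then
      let mid := PySem.Int.floordiv (low + high) 2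
      let mid_total := ((PySem.Dict.mk ((PySem.List.pyGet? history mid).getD [])).get? "total").getD 0
      if mid_total = target_total then mid
      else if mid_total < target_total then bsA_go history target_total (mid + 1) high fuel
      else bsA_go history target_total low (mid - 1) fuel
    else -1

def binary_search_history (history : List (List (String × Int))) (target_total : Int) : Int :=
  bsA_go history target_total 0 ((history.length : Int) - 1) (history.length + 1)

-- ===== PORT B =====
-- the comprehension [entry['total'] for entry in history] (the .getD default is unreached under Pre_)
def bsB_totals (history : List (List (String × Int))) : List Int :=
  history.map (fun entry => ((PySem.Dict.mk entry).get? "total").getD 0)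

-- the inner 'search': recursion over ever-shorter slices of the totals list, carrying an offset;
-- rest[0] → .headI (default 0 is unreached: seg.drop mid is nonempty whenever seg is)
def bsB_search (target_total : Int) (seg : List Int) (offset : Nat) : Int :=
  if hseg : seg = [] then -1
  else
    let mid := (seg.length - 1) / 2
    let pivot := (seg.drop mid).headI
    if pivot = target_total then ((offset + mid : Nat) : Int)
    else if pivot < target_total then bsB_search target_total (seg.drop (mid + 1)) (offset + mid + 1)
    else bsB_search target_total (seg.take mid) offset
termination_by seg.length
decreasing_by
  · have := List.length_pos_iff.mpr hseg
    simp only [List.length_drop]; omega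
  · have := List.length_pos_iff.mpr hseg
    simp only [List.length_take]; omega

def binary_search_history_alt (history : List (List (String × Int))) (target_total : Int) : Int :=
  bsB_search target_total (bsB_totals history) 0

-- ===== PRECONDITION & SPEC =====
-- Pre_ excludes histories in which some entry lacks the key 'total': B's first pass raises KeyError
-- on any such entry, and A raises on the probed ones (entries A happens never to probe are excluded
-- with the rest, since B cannot return there at all).
def Pre_binary_search_history (history : List (List (String × Int))) (target_total : Int) : Prop :=
  ∀ d ∈ history, ((PySem.Dict.mk d).get? "total").isSome = true
instance (history : List (List (String × Int))) (target_total : Int) : Decidable (Pre_binary_search_history history target_total) := by unfold Pre_binary_search_history; infer_instance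
def pvWitness_binary_search_history : (List (List (String × Int))) × Int := ([[("total", 3)], [("total", 7)]], 7)
def Spec_binary_search_history (history : List (List (String × Int))) (target_total : Int) (out : Int) : Prop := out = binary_search_history_alt history target_total
instance (history : List (List (String × Int))) (target_total : Int) (out : Int) : Decidable (Spec_binary_search_history history target_total out) := by unfold Spec_binary_search_history; infer_instance

-- ===== CLAIM (what is proved, stated in full; the proofs are below) =====
def Claim_equal_binary_search_history : Prop := ∀ (history : List (List (String × Int))) (target_total : Int), Dom_binary_search_history history target_total → Pre_binary_search_history history target_total → Spec_binary_search_history history target_total (binary_search_history history target_total)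

-- ===== LEMMAS AND PROOFS =====

-- A's loop on interval [l, l+n-1] equals B's recursion on the totals slice totals[l : l+n],
-- for any sufficient fuel on A's side.
theorem bsA_go_eq_bsB_search (history : List (List (String × Int))) (t : Int) :
    ∀ n l fA : Nat, n < fA → l + n ≤ history.length →
      bsA_go history t (l : Int) ((l : Int) + (n : Int) - 1) fA =
      bsB_search t (((bsB_totals history).drop l).take n) l := by
  intro n
  induction n using Nat.strong_induction_on with
  | _ n ih =>
    intro l fA hfA hln
    obtain ⟨fA', rfl⟩ : ∃ k, fA = k + 1 := ⟨fA - 1, by omega⟩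
    have hTlen : (bsB_totals history).length = history.length := by simp [bsB_totals]
    set seg := ((bsB_totals history).drop l).take n with hsegdef
    have hseglen : seg.length = n := by
      simp [hsegdef, List.length_take, List.length_drop]; omega
    rcases Nat.eq_zero_or_pos n with hn0 | hnpos
    · subst hn0
      have hseg0 : seg = [] := List.eq_nil_of_length_eq_zero hseglen
      rw [bsB_search, dif_pos hseg0]
      simp only [bsA_go]
      rw [if_neg (show ¬ ((l : Int) ≤ (l : Int) + ((0 : Nat) : Int) - 1) by push_cast; omega)]
    · obtain ⟨m, hm⟩ : ∃ m, (n - 1) / 2 = m := ⟨_, rfl⟩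
      have hm_lt : m < n := by omega
      have hseg_ne : seg ≠ [] := by
        intro h; rw [h] at hseglen; simp at hseglen; omega
      -- A's midpoint index
      have hA_mid : PySem.Int.floordiv ((l : Int) + ((l : Int) + (n : Int) - 1)) 2 = ((l + m : Nat) : Int) := by
        rw [show (l : Int) + ((l : Int) + (n : Int) - 1) = ((2 * l + (n - 1) : Nat) : Int) by push_cast; omega]
        rw [show PySem.Int.floordiv ((2 * l + (n - 1) : Nat) : Int) 2 = (((2 * l + (n - 1)) / 2 : Nat) : Int) from
          by exact_mod_cast PySem.Int.floordiv_natCast (2 * l + (n - 1)) 2]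
        congr 1; omega
      -- the probed elements agree
      have hlm : l + m < history.length := by omega
      have hgetA : PySem.List.pyGet? history ((l + m : Nat) : Int) = some (history[l + m]'hlm) := by
        rw [PySem.List.pyGet?_natCast]; exact List.getElem?_eq_getElem hlm
      have hlmT : l + m < (bsB_totals history).length := by omega
      have hmseg : m < seg.length := by omega
      have hdropm : seg.drop m = seg[m]'hmseg :: seg.drop (m + 1) :=
        List.drop_eq_getElem_cons hmseg
      have hpivot : seg[m]'hmseg = ((PySem.Dict.mk (history[l + m]'hlm)).get? "total").getD 0 := by
        simp [hsegdef, List.getElem_take, List.getElem_drop, bsB_totals]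
      -- unfold both sides one step
      rw [bsB_search, dif_neg hseg_ne]
      simp only [bsA_go]
      rw [if_pos (show (l : Int) ≤ (l : Int) + (n : Int) - 1 by omega)]
      simp only [hseglen, hm, hA_mid, hgetA, Option.getD_some, hdropm, List.headI_cons, hpivot]
      by_cases h1 : ((PySem.Dict.mk (history[l + m]'hlm)).get? "total").getD 0 = t
      · simp only [if_pos h1]
      · simp only [if_neg h1]
        by_cases h2 : ((PySem.Dict.mk (history[l + m]'hlm)).get? "total").getD 0 < t
        · simp only [if_pos h2]
          -- right half
          rw [show ((l + m : Nat) : Int) + 1 = ((l + m + 1 : Nat) : Int) by push_cast; ring,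
             show (l : Int) + (n : Int) - 1 = ((l + m + 1 : Nat) : Int) + ((n - m - 1 : Nat) : Int) - 1 by
               push_cast; omega]
          have hdrop : seg.drop (m + 1) = (((bsB_totals history).drop (l + m + 1)).take (n - m - 1)) := by
            rw [hsegdef, List.drop_take, List.drop_drop]
            congr 1
          rw [hdrop]
          exact ih (n - m - 1) (by omega) (l + m + 1) fA' (by omega) (by omega)
        · simp only [if_neg h2]
          -- left half
          rw [show ((l + m : Nat) : Int) - 1 = (l : Int) + ((m : Nat) : Int) - 1 by push_cast; ring]
          have htake : seg.take m = ((bsB_totals history).drop l).take m := by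
            rw [hsegdef, List.take_take]
            congr 1; omega
          rw [htake]
          exact ih m hm_lt l fA' (by omega) (by omega)

theorem binary_search_history_spec : Claim_equal_binary_search_history := by
  intro history t _ _
  unfold Spec_binary_search_history binary_search_history binary_search_history_alt
  have h := bsA_go_eq_bsB_search history t history.length 0 (history.length + 1)
    (by omega) (by omega)
  simp only [List.drop_zero] at h
  rw [show List.take history.length (bsB_totals history) = bsB_totals history from by
    rw [show history.length = (bsB_totals history).length from by simp [bsB_totals], List.take_length]] at h
  simpa using h
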